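-- pv_equiv track=rewrite | github.com/biopragmatics/pyobo | src/pyobo/sources/expasy.py | _group_by_id
-- ===== SOURCE A (Python) =====
-- def _group_by_id(lines):
--     """Group lines by identifier."""
--     groups = []
--     for line in lines:  # TODO replace with itertools.groupby
--         line = line.strip()
--
--         if line.startswith("ID"):
--             groups.append([])
--
--         if not groups:
--             continue
--
--         descriptor = line[:2]
--         value = line[5:]
--
--         groups[-1].append((descriptor, value))
--
--     return groups
-- ===== SOURCE B (Python) =====
-- def _group_by_id(lines):
--     """Group lines by identifier."""
--     stripped = [line.strip() for line in lines]
--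
--     def make_entry(line):
--         return (line[:2], line[5:])
--
--     def chunks(ls):
--         # ls is empty or starts with an "ID" line; emit the chunk up to the
--         # next "ID" line, then recurse on the rest.
--         if not ls:
--             return []
--         i = 1
--         while i < len(ls) and not ls[i].startswith("ID"):
--             i += 1
--         return [[make_entry(line) for line in ls[:i]]] + chunks(ls[i:])
--
--     # discard everything before the first "ID" line
--     start = 0
--     while start < len(stripped) and not stripped[start].startswith("ID"):
--         start += 1
--     return chunks(stripped[start:])
-- ===== Notes on version B (the rewrite author's own statement) =====
-- stated objective: alternative
-- what changed: B strips all lines up front, drops the prefix before the first ID line, and recursively splits the stripped list into chunks at ID lines (each chunk mapped to (line[:2], line[5:]) tuples), instead of A's single fold that appends to a mutable last group.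
import Mathlib
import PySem

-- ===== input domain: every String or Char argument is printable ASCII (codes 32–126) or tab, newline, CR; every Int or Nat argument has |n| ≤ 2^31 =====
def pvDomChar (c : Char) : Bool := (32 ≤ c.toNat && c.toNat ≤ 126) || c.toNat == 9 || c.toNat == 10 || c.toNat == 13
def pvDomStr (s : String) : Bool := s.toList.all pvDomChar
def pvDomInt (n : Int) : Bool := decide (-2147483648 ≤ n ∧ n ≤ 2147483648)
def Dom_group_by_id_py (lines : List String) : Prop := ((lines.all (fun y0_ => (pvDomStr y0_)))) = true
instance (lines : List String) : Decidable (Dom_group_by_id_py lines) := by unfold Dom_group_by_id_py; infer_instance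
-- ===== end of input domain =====

-- B restructures A's single fold (mutable last group) into: strip all lines, drop the
-- prefix before the first ID line, recursively split into chunks at ID lines (objective: alternative).

-- ===== PORT A =====
-- one iteration of A's for-loop
def pvStepA (groups : List (List (String × String))) (line0 : String) :
    List (List (String × String)) :=
  let line := PySem.Str.strip line0
  let groups := if PySem.Str.startswith line "ID" then groups ++ [[]] else groups
  if groups.isEmpty then groups
  else
    let descriptor := PySem.Str.slice line none (some 2)
    let value := PySem.Str.slice line (some 5) none
    groups.dropLast ++ [(groups.getLast?.getD []) ++ [(descriptor, value)]]

def group_by_id_py (lines : List String) : List (List (String × String)) :=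
  lines.foldl pvStepA []

-- ===== PORT B =====
def pvIsID (s : String) : Bool := PySem.Str.startswith s "ID"

def pvMakeEntry (line : String) : String × String :=
  (PySem.Str.slice line none (some 2), PySem.Str.slice line (some 5) none)

-- chunks(ls): the inner while-loop scanning to the next ID line is the
-- takeWhile/dropWhile split of the tail
def pvChunks : List String → List (List (String × String))
  | [] => []
  | l :: rest =>
      ((l :: rest.takeWhile (fun s => !pvIsID s)).map pvMakeEntry)
        :: pvChunks (rest.dropWhile (fun s => !pvIsID s))
termination_by ls => ls.length
decreasing_by
  simp only [List.length_cons]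
  exact Nat.lt_succ_of_le (List.length_dropWhile_le _ _)

def group_by_id_py_alt (lines : List String) : List (List (String × String)) :=
  pvChunks ((lines.map PySem.Str.strip).dropWhile (fun s => !pvIsID s))

-- ===== PRECONDITION & SPEC =====
def Spec_group_by_id_py (lines : List String) (out : List (List (String × String))) : Prop := out = group_by_id_py_alt lines
instance (lines : List String) (out : List (List (String × String))) : Decidable (Spec_group_by_id_py lines out) := by unfold Spec_group_by_id_py; infer_instance

-- ===== CLAIM (what is proved, stated in full; the proofs are below) =====
def Claim_equal_group_by_id_py : Prop := ∀ (lines : List String), Dom_group_by_id_py lines → Spec_group_by_id_py lines (group_by_id_py lines)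

-- ===== LEMMAS AND PROOFS =====

-- A's loop body on an already-stripped line
def pvStep' (groups : List (List (String × String))) (line : String) :
    List (List (String × String)) :=
  let groups := if PySem.Str.startswith line "ID" then groups ++ [[]] else groups
  if groups.isEmpty then groups
  else
    groups.dropLast ++ [(groups.getLast?.getD []) ++ [pvMakeEntry line]]

-- main invariant: with a nonempty accumulator, the fold extends the last group
-- with the non-ID prefix and then chunks the rest
theorem pvFold_nonempty (ls : List String) :
    ∀ (gs : List (List (String × String))) (g : List (String × String)),
      ls.foldl pvStep' (gs ++ [g])
        = gs ++ (g ++ (ls.takeWhile (fun s => !pvIsID s)).map pvMakeEntry)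
            :: pvChunks (ls.dropWhile (fun s => !pvIsID s)) := by
  induction ls with
  | nil => intro gs g; simp [pvChunks]
  | cons l ls ih =>
    intro gs g
    by_cases hc : PySem.Chars.startswith l.toList ['I', 'D'] = true
    · have hstep : pvStep' (gs ++ [g]) l
          = (gs ++ [g]) ++ [[pvMakeEntry l]] := by
        simp [pvStep', hc]
      rw [List.foldl_cons, hstep, ih (gs ++ [g]) [pvMakeEntry l]]
      simp [List.takeWhile, List.dropWhile, pvIsID, hc, pvChunks]
    · have hstep : pvStep' (gs ++ [g]) l
          = gs ++ [g ++ [pvMakeEntry l]] := by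
        simp [pvStep', hc]
      rw [List.foldl_cons, hstep, ih gs (g ++ [pvMakeEntry l])]
      simp [List.takeWhile, List.dropWhile, pvIsID, hc]

-- skip phase: with an empty accumulator A drops lines until the first ID line
theorem pvFold_empty (ls : List String) :
    ls.foldl pvStep' [] = pvChunks (ls.dropWhile (fun s => !pvIsID s)) := by
  induction ls with
  | nil => simp [pvChunks]
  | cons l ls ih =>
    by_cases hc : PySem.Chars.startswith l.toList ['I', 'D'] = true
    · have hstep : pvStep' [] l = [[pvMakeEntry l]] := by simp [pvStep', hc]
      rw [List.foldl_cons, hstep,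
        show ([[pvMakeEntry l]] : List (List (String × String))) = [] ++ [[pvMakeEntry l]] from rfl,
        pvFold_nonempty ls [] [pvMakeEntry l]]
      simp [List.dropWhile, pvIsID, hc, pvChunks]
    · have hstep : pvStep' [] l = [] := by simp [pvStep', hc]
      rw [List.foldl_cons, hstep, ih]
      simp [List.dropWhile, pvIsID, hc]

-- ===== VERDICT (by name: the statement is the Claim_ definition above) =====
theorem group_by_id_py_spec : Claim_equal_group_by_id_py := by
  intro lines _
  unfold Spec_group_by_id_py group_by_id_py group_by_id_py_alt
  have : lines.foldl pvStepA [] = (lines.map PySem.Str.strip).foldl pvStep' [] := by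
    rw [List.foldl_map]; rfl
  rw [this, pvFold_empty]
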